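-- pv_equiv track=rewrite | github.com/B21DCCN712/Python_Ptit | Bien_va_kieu_du_lieu_don_gian/Liet_ke_so_dep.py | sodep
-- ===== SOURCE A (Python) =====
-- def sodep(n):
--     n=str(n)
--     if len(n) % 2 == 1 :
--         return 0
--     if n != n[::-1]:
--         return 0
--     for i in n:
--         if i != '0' and i != '4' and i != '6' and i != '2' and i != '8':
--             return 0
--     return 1
-- ===== SOURCE B (Python) =====
-- def sodep(n):
--     n = str(n)
--     L = len(n)
--     if L % 2 == 1:
--         return 0
--     for i in range(L // 2):
--         if n[i] != n[L - 1 - i]: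
--             return 0
--         if n[i] not in '02468':
--             return 0
--     return 1
-- ===== Notes on version B (the rewrite author's own statement) =====
-- stated objective: alternative
-- what changed: Replaces the full-string reversal comparison plus a second full scan for even digits by a single loop over the first half that compares mirrored characters and checks evenness there only (the mirror property makes half-checking sufficient).
import Mathlib
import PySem

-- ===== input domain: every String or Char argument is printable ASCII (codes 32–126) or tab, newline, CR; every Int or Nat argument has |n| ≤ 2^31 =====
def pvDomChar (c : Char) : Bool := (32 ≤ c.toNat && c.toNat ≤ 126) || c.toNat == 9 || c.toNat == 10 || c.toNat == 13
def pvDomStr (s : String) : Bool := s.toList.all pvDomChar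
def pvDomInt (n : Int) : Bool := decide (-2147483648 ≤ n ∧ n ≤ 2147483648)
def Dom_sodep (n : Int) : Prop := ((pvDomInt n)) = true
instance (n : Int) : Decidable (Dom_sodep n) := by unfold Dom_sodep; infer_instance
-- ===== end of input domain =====

-- B fuses A's reversal comparison and full even-digit scan into one half-length mirror loop; alternative decomposition, same result.


-- ===== PORT A =====
-- A's `for i in n: if i != '0' and … : return 0` loop, char by char
def sodepEvenLoop : List Char → Int
  | [] => 1
  | c :: rest =>
    if c ≠ '0' ∧ c ≠ '4' ∧ c ≠ '6' ∧ c ≠ '2' ∧ c ≠ '8' then 0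
    else sodepEvenLoop rest

def sodep (n : Int) : Int :=
  let s := PySem.Int.toChars n            -- n = str(n)
  if s.length % 2 == 1 then 0
  else if s ≠ s.reverse then 0            -- n != n[::-1]  (PySem.List.slice?_none_none_neg_one: [::-1] is reverse, exact)
  else sodepEvenLoop s

-- ===== PORT B =====
-- B's `for i in range(L//2)` loop with its two early returns
def sodepHalfLoop (s : List Char) (L : Nat) : List Nat → Int
  | [] => 1
  | i :: rest =>
    if s.getD i ' ' ≠ s.getD (L - 1 - i) ' ' then 0      -- n[i] != n[L-1-i]; indices are in range so getD is exact
    else if ¬ (s.getD i ' ' ∈ (['0', '2', '4', '6', '8'] : List Char)) then 0   -- n[i] not in '02468'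
    else sodepHalfLoop s L rest

def sodep_alt (n : Int) : Int :=
  let s := PySem.Int.toChars n
  let L := s.length
  if L % 2 == 1 then 0
  else sodepHalfLoop s L (List.range (L / 2))

-- ===== PRECONDITION & SPEC =====
def Spec_sodep (n : Int) (out : Int) : Prop := out = sodep_alt n
instance (n : Int) (out : Int) : Decidable (Spec_sodep n out) := by unfold Spec_sodep; infer_instance

-- ===== CLAIM (what is proved, stated in full; the proofs are below) =====
def Claim_equal_sodep : Prop := ∀ (n : Int), Dom_sodep n → Spec_sodep n (sodep n)

-- ===== LEMMAS AND PROOFS =====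

abbrev pvEven (c : Char) : Prop := c = '0' ∨ c = '4' ∨ c = '6' ∨ c = '2' ∨ c = '8'

theorem mem_evens (c : Char) : c ∈ (['0', '2', '4', '6', '8'] : List Char) ↔ pvEven c := by
  simp [pvEven]; tauto

theorem loopA_eq (s : List Char) :
    sodepEvenLoop s = if ∀ c ∈ s, pvEven c then 1 else 0 := by
  induction s with
  | nil => simp [sodepEvenLoop]
  | cons c rest ih =>
    by_cases hc : pvEven c
    · have hng : ¬ (c ≠ '0' ∧ c ≠ '4' ∧ c ≠ '6' ∧ c ≠ '2' ∧ c ≠ '8') := by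
        rcases hc with h | h | h | h | h <;> simp [h]
      have hiff : (∀ x ∈ c :: rest, pvEven x) ↔ (∀ x ∈ rest, pvEven x) := by
        rw [List.forall_mem_cons]; exact and_iff_right hc
      simp only [sodepEvenLoop, if_neg hng, ih, hiff]
    · have hbad : c ≠ '0' ∧ c ≠ '4' ∧ c ≠ '6' ∧ c ≠ '2' ∧ c ≠ '8' := by
        unfold pvEven at hc; tauto
      have hnall : ¬ ∀ x ∈ c :: rest, pvEven x := fun h => hc (h c List.mem_cons_self)
      simp only [sodepEvenLoop, if_pos hbad, if_neg hnall]

theorem loopB_eq (s : List Char) (L : Nat) (idxs : List Nat) :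
    sodepHalfLoop s L idxs =
      if ∀ i ∈ idxs, s.getD i ' ' = s.getD (L - 1 - i) ' ' ∧ pvEven (s.getD i ' ') then 1 else 0 := by
  induction idxs with
  | nil => simp [sodepHalfLoop]
  | cons i rest ih =>
    by_cases h1 : s.getD i ' ' = s.getD (L - 1 - i) ' '
    · by_cases h2 : pvEven (s.getD i ' ')
      · have h2' : s.getD i ' ' ∈ (['0', '2', '4', '6', '8'] : List Char) := (mem_evens _).mpr h2
        have hiff : (∀ j ∈ i :: rest, s.getD j ' ' = s.getD (L - 1 - j) ' ' ∧ pvEven (s.getD j ' '))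
            ↔ (∀ j ∈ rest, s.getD j ' ' = s.getD (L - 1 - j) ' ' ∧ pvEven (s.getD j ' ')) := by
          rw [List.forall_mem_cons]; exact and_iff_right ⟨h1, h2⟩
        simp only [sodepHalfLoop, if_neg (not_not.mpr h1), if_neg (not_not.mpr h2'), ih, hiff]
      · have h2' : s.getD i ' ' ∉ (['0', '2', '4', '6', '8'] : List Char) :=
          fun h => h2 ((mem_evens _).mp h)
        have hnall : ¬ ∀ j ∈ i :: rest, s.getD j ' ' = s.getD (L - 1 - j) ' ' ∧ pvEven (s.getD j ' ') :=
          fun h => h2 (h i List.mem_cons_self).2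
        simp only [sodepHalfLoop, if_neg (not_not.mpr h1), if_pos h2', if_neg hnall]
    · have hnall : ¬ ∀ j ∈ i :: rest, s.getD j ' ' = s.getD (L - 1 - j) ' ' ∧ pvEven (s.getD j ' ') :=
        fun h => h1 (h i List.mem_cons_self).1
      simp only [sodepHalfLoop, if_pos h1, if_neg hnall]

-- palindrome + all-even  ↔  the half-length mirror-and-even check, for even length
theorem main_equiv (s : List Char) (hev : s.length % 2 = 0) :
    (s = s.reverse ∧ ∀ c ∈ s, pvEven c) ↔
      (∀ i ∈ List.range (s.length / 2),
        s.getD i ' ' = s.getD (s.length - 1 - i) ' ' ∧ pvEven (s.getD i ' ')) := by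
  set L := s.length with hL
  constructor
  · rintro ⟨hpal, hall⟩ i hi
    rw [List.mem_range] at hi
    have hiL : i < L := by omega
    have hmir : L - 1 - i < L := by omega
    constructor
    · conv_lhs => rw [hpal]
      rw [List.getD_eq_getElem s.reverse ' ' (by simpa using hiL),
          List.getD_eq_getElem s ' ' hmir, List.getElem_reverse]
    · rw [List.getD_eq_getElem s ' ' hiL]
      exact hall _ (List.getElem_mem hiL)
  · intro h
    have key : ∀ i (hiL : i < L), s[i] = s[L - 1 - i]'(by omega) ∧ pvEven s[i] := by
      intro i hiL
      by_cases hhalf : i < L / 2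
      · have := h i (List.mem_range.mpr hhalf)
        rwa [List.getD_eq_getElem s ' ' hiL,
             List.getD_eq_getElem s ' ' (show L - 1 - i < L by omega)] at this
      · have hj : L - 1 - i < L / 2 := by omega
        have hjL : L - 1 - i < L := by omega
        have hmm : L - 1 - (L - 1 - i) < L := by omega
        have := h (L - 1 - i) (List.mem_range.mpr hj)
        rw [List.getD_eq_getElem s ' ' hjL, List.getD_eq_getElem s ' ' hmm] at this
        have hii : s[L - 1 - (L - 1 - i)]'hmm = s[i]'hiL := by
          congr 1; omega
        rw [hii] at this
        exact ⟨this.1.symm, this.1.symm ▸ this.2⟩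
    constructor
    · apply List.ext_getElem (by simp)
      intro i h1 h2
      rw [List.getElem_reverse]
      exact (key i h1).1
    · intro c hc
      obtain ⟨i, hiL, rfl⟩ := List.mem_iff_getElem.mp hc
      exact (key i hiL).2

-- ===== VERDICT (by name: the statement is the Claim_ definition above) =====
theorem sodep_spec : Claim_equal_sodep := by
  intro n _
  unfold Spec_sodep sodep sodep_alt
  set s := PySem.Int.toChars n with hs
  by_cases hodd : s.length % 2 = 1
  · simp [hodd]
  · have hev : s.length % 2 = 0 := by omega
    have hbe : (s.length % 2 == 1) = false := by simp [hev]
    simp only [hbe, Bool.false_eq_true, if_false]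
    rw [loopB_eq, loopA_eq]
    by_cases hB : ∀ i ∈ List.range (s.length / 2),
        s.getD i ' ' = s.getD (s.length - 1 - i) ' ' ∧ pvEven (s.getD i ' ')
    · obtain ⟨hpal, hall⟩ := (main_equiv s hev).mpr hB
      rw [if_neg (not_not.mpr hpal), if_pos hall, if_pos hB]
    · rw [if_neg hB]
      by_cases hpal : s = s.reverse
      · exact (if_neg (not_not.mpr hpal)).trans
          (if_neg fun hall => hB ((main_equiv s hev).mp ⟨hpal, hall⟩))
      · exact if_pos hpal
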